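-- pv_equiv track=rewrite | github.com/dhialnz/lnz | apps/api/scripts/generate_sample_excel.py | _build_phase_schedule
-- ===== SOURCE A (Python) =====
-- def _build_phase_schedule(weeks: int) -> list[str]:
--     """Partition weeks into bear → recovery → expansion phases."""
--     bear_end = weeks // 4
--     recovery_end = weeks // 2
--     phases = []
--     for i in range(weeks):
--         if i < bear_end:
--             phases.append("bear")
--         elif i < recovery_end:
--             phases.append("recovery")
--         else:
--             phases.append("expansion")
--     return phases
-- ===== SOURCE B (Python) =====
-- def _build_phase_schedule(weeks: int) -> list[str]:
--     """Preallocate all weeks as expansion, then overwrite the first half as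
--     recovery and the first quarter as bear (staged overwrite passes)."""
--     phases = ["expansion"] * weeks
--     for i in range(weeks // 2):
--         phases[i] = "recovery"
--     for i in range(weeks // 4):
--         phases[i] = "bear"
--     return phases
-- ===== Notes on version B (the rewrite author's own statement) =====
-- stated objective: alternative
-- what changed: Instead of a single append loop that branches per index, B preallocates the whole list as 'expansion' and then runs two staged overwrite passes that assign 'recovery' to the first half and 'bear' to the first quarter by index, with no per-element branching.
import Mathlib
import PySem

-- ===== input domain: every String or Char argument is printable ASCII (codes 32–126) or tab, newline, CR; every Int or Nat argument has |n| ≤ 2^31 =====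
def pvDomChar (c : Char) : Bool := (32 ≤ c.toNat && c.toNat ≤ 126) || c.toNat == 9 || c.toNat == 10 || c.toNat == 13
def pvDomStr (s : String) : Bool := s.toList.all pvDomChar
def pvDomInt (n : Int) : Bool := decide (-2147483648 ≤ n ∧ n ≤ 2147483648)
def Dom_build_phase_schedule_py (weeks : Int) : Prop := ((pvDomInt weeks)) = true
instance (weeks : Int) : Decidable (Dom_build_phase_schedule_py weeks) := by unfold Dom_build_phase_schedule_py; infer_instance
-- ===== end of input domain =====

-- B replaces A's single append-loop with a per-index branch by preallocating the whole
-- list as "expansion" and running two staged overwrite passes (first half → "recovery",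
-- first quarter → "bear"), with no per-element branching (objective: alternative).

-- ===== PORT A =====
-- literal port: compute the two ends, then loop over range(weeks) appending by branch
def build_phase_schedule_py (weeks : Int) : List String :=
  let bear_end := PySem.Int.floordiv weeks 4
  let recovery_end := PySem.Int.floordiv weeks 2
  (PySem.List.pyRange 0 weeks 1).foldl
    (fun phases i =>
      if i < bear_end then phases ++ ["bear"]
      else if i < recovery_end then phases ++ ["recovery"]
      else phases ++ ["expansion"]) []

-- ===== PORT B =====
-- literal port of Source B: `["expansion"] * weeks` (empty for weeks ≤ 0, exactly toNat),
-- then two index-assignment passes; `phases[i] = v` on an in-range index is List.set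
def build_phase_schedule_py_alt (weeks : Int) : List String :=
  let phases := List.replicate weeks.toNat "expansion"
  let phases := (PySem.List.pyRange 0 (PySem.Int.floordiv weeks 2) 1).foldl
    (fun l i => l.set i.toNat "recovery") phases
  (PySem.List.pyRange 0 (PySem.Int.floordiv weeks 4) 1).foldl
    (fun l i => l.set i.toNat "bear") phases

-- ===== PRECONDITION & SPEC =====
def Spec_build_phase_schedule_py (weeks : Int) (out : List String) : Prop := out = build_phase_schedule_py_alt weeks
instance (weeks : Int) (out : List String) : Decidable (Spec_build_phase_schedule_py weeks out) := by unfold Spec_build_phase_schedule_py; infer_instance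

-- ===== CLAIM (what is proved, stated in full; the proofs are below) =====
def Claim_equal_build_phase_schedule_py : Prop := ∀ (weeks : Int), Dom_build_phase_schedule_py weeks → Spec_build_phase_schedule_py weeks (build_phase_schedule_py weeks)

-- ===== LEMMAS AND PROOFS =====

-- fold that appends one element per item is a map
theorem pv_foldl_append_map {α : Type} (f : α → String) :
    ∀ (l : List α) (acc : List String),
      l.foldl (fun phases i => phases ++ [f i]) acc = acc ++ l.map f := by
  intro l
  induction l with
  | nil => simp
  | cons x xs ih => intro acc; simp [List.foldl, ih]

-- block decomposition of A's labelled range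
theorem pv_range_blocks (a b : Nat) (hab : a ≤ b) :
    ∀ n : Nat,
      (List.range n).map (fun k => if k < a then "bear" else if k < b then "recovery" else "expansion")
        = List.replicate (min n a) "bear"
          ++ List.replicate (min n b - min n a) "recovery"
          ++ List.replicate (n - min n b) "expansion" := by
  intro n
  induction n with
  | zero => simp
  | succ n ih =>
    rw [List.range_succ, List.map_append, ih]
    by_cases h1 : n < a
    · have e3 : min n b - min n a = 0 := by omega
      have e4 : (n+1) - min (n+1) b = 0 := by omega
      have e5 : n - min n b = 0 := by omega
      simp [h1, e3, e4, e5, List.replicate_succ']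
      omega
    · by_cases h2 : n < b
      · have e1 : min (n+1) a = min n a := by omega
        have e5 : n - min n b = 0 := by omega
        simp [h1, h2, e1, e5]
        rw [show min n b = n from by omega,
            show (n + 1) - min n a = (n - min n a) + 1 from by omega, List.replicate_succ']
      · have e1 : min (n+1) a = min n a := by omega
        have e2 : min (n+1) b = min n b := by omega
        simp [h1, h2, e1, e2, List.append_assoc]
        rw [show (n + 1) - min n b = (n - min n b) + 1 from by omega, List.replicate_succ']

-- overwriting indices 0..k-1 with v turns the list into a v-prefix plus its own tail
theorem pv_foldl_set (v : String) :
    ∀ (k : Nat) (l : List String),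
      (List.range k).foldl (fun l i => l.set i v) l
        = List.replicate (min k l.length) v ++ l.drop k := by
  intro k
  induction k with
  | zero => intro l; simp
  | succ k ih =>
    intro l
    rw [List.range_succ, List.foldl_append, ih]
    by_cases h : k < l.length
    · have hk : min k l.length = k := by omega
      rw [hk, List.foldl_cons, List.foldl_nil,
          List.set_append_right _ _ (by simp)]
      have hd : (l.drop k).set (k - (List.replicate k v).length) v
          = v :: l.drop (k+1) := by
        rw [List.length_replicate, Nat.sub_self]
        have : l.drop k = l[k] :: l.drop (k+1) := List.drop_eq_getElem_cons h
        rw [this]; rfl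
      rw [hd, show min (k+1) l.length = k + 1 from by omega]
      rw [List.replicate_succ' (n := k)]
      simp
    · have hd : l.drop k = [] := List.drop_eq_nil_of_le (by omega)
      have hd' : l.drop (k+1) = [] := List.drop_eq_nil_of_le (by omega)
      rw [List.foldl_cons, List.foldl_nil, hd, hd',
          show min (k+1) l.length = min k l.length from by omega, List.append_nil]
      exact List.set_eq_of_length_le (by rw [List.length_replicate]; omega)

-- ===== VERDICT (by name: the statement is the Claim_ definition above) =====
theorem build_phase_schedule_py_spec : Claim_equal_build_phase_schedule_py := by
  intro weeks _
  unfold Spec_build_phase_schedule_py build_phase_schedule_py build_phase_schedule_py_alt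
  have hf4 : PySem.Int.floordiv weeks 4 = weeks / 4 :=
    PySem.Int.floordiv_eq_ediv_of_pos (by norm_num)
  have hf2 : PySem.Int.floordiv weeks 2 = weeks / 2 :=
    PySem.Int.floordiv_eq_ediv_of_pos (by norm_num)
  simp only [hf4, hf2]
  by_cases hw : 0 ≤ weeks
  · -- nonnegative: weeks = ↑n
    obtain ⟨n, rfl⟩ := Int.eq_ofNat_of_zero_le hw
    -- A side → map over List.range n → blocks
    rw [PySem.List.pyRange_one (a := 0) (b := (n : Int))]
    rw [show ((n : Int) - 0).toNat = n from by omega]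
    rw [show (fun (phases : List String) (i : Int) =>
        if i < (n : Int) / 4 then phases ++ ["bear"]
        else if i < (n : Int) / 2 then phases ++ ["recovery"] else phases ++ ["expansion"])
      = fun (phases : List String) (i : Int) => phases ++
          [if i < (n : Int) / 4 then "bear" else if i < (n : Int) / 2 then "recovery" else "expansion"] from by
        funext phases i; split_ifs <;> rfl]
    rw [pv_foldl_append_map
      (f := fun i => if i < (n : Int) / 4 then "bear"
        else if i < (n : Int) / 2 then "recovery" else "expansion")]
    rw [List.map_map]
    have hmap : (List.range n).map ((fun i => if i < (n : Int) / 4 then "bear"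
          else if i < (n : Int) / 2 then "recovery" else "expansion") ∘ (fun k : Nat => (0 : Int) + k))
        = (List.range n).map (fun k => if k < n / 4 then "bear" else if k < n / 2 then "recovery" else "expansion") := by
      apply List.map_congr_left
      intro k _
      simp only [Function.comp, zero_add]
      have c4 : ((k : Int) < (n : Int) / 4) ↔ (k < n / 4) := by omega
      have c2 : ((k : Int) < (n : Int) / 2) ↔ (k < n / 2) := by omega
      simp only [c4, c2]
    rw [hmap, pv_range_blocks (n / 4) (n / 2)
      (Nat.div_le_div_left (by norm_num) (by norm_num)) n, List.nil_append]
    -- B side → two set-folds over List.range → same blocks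
    rw [PySem.List.pyRange_one (a := 0) (b := (n : Int) / 2),
        PySem.List.pyRange_one (a := 0) (b := (n : Int) / 4)]
    rw [show ((n : Int) / 2 - 0).toNat = n / 2 from by omega,
        show ((n : Int) / 4 - 0).toNat = n / 4 from by omega]
    rw [List.foldl_map, List.foldl_map]
    have hfun2 : (fun (l : List String) (k : Nat) => l.set ((0 : Int) + k).toNat "recovery")
        = fun (l : List String) (k : Nat) => l.set k "recovery" := by
      funext l k; rw [show ((0 : Int) + k).toNat = k from by omega]
    have hfun4 : (fun (l : List String) (k : Nat) => l.set ((0 : Int) + k).toNat "bear")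
        = fun (l : List String) (k : Nat) => l.set k "bear" := by
      funext l k; rw [show ((0 : Int) + k).toNat = k from by omega]
    rw [hfun2, hfun4, show ((n : Int)).toNat = n from by omega]
    rw [pv_foldl_set "recovery" (n / 2) (List.replicate n "expansion")]
    rw [List.length_replicate, List.drop_replicate,
        show min (n / 2) n = n / 2 from by omega]
    rw [pv_foldl_set "bear" (n / 4)]
    have hlen : (List.replicate (n / 2) "recovery" ++ List.replicate (n - n / 2) "expansion").length = n := by
      simp; omega
    rw [hlen, show min (n / 4) n = n / 4 from by omega]
    rw [List.drop_append_of_le_length (by simp; omega), List.drop_replicate]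
    rw [show min n (n / 4) = n / 4 from by omega, show min n (n / 2) = n / 2 from by omega,
        List.append_assoc]
  · -- negative: every range is empty and the replicate is empty
    rw [PySem.List.pyRange_one_eq_nil (by omega),
        PySem.List.pyRange_one_eq_nil (by omega),
        PySem.List.pyRange_one_eq_nil (by omega),
        show weeks.toNat = 0 from by omega]
    simp
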